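-- pv_equiv track=rewrite | github.com/blismatic/AdventOfCode-2024 | 14/main.py | part1
-- ===== SOURCE A (Python) =====
-- from collections import defaultdict
-- from typing import TypeAlias
--
-- Grid: TypeAlias = dict[tuple[int, int], list[tuple[int, int]]]
--
-- HEIGHT = 103
--
-- WIDTH = 101
--
-- def simulate(g: Grid, n: int = 1, backwards: bool = False) -> Grid:
--     new_grid = defaultdict(list)
--
--     for pos in g:
--         px, py = pos
--         robots = g[pos]
--
--         for r in robots:
--             vx, vy = r
--             if backwards:
--                 new_x = (px - (vx * n)) % WIDTH
--                 new_y = (py - (vy * n)) % HEIGHT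
--             else:
--                 new_x = (px + (vx * n)) % WIDTH
--                 new_y = (py + (vy * n)) % HEIGHT
--
--             new_grid[(new_x, new_y)].append((vx, vy))
--
--     return new_grid
--
-- def split_into_quadrants(g: Grid) -> list[Grid]:
--     middle_column = WIDTH // 2
--     middle_row = HEIGHT // 2
--
--     top_left = defaultdict(list)
--     top_right = defaultdict(list)
--     bot_left = defaultdict(list)
--     bot_right = defaultdict(list)
--
--     for pos in g:
--         px, py = pos
--         if px < middle_column and py < middle_row:
--             top_left[pos] = g[pos]
--         elif px > middle_column and py < middle_row:
--             top_right[pos] = g[pos]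
--         elif px < middle_column and py > middle_row:
--             bot_left[pos] = g[pos]
--         elif px > middle_column and py > middle_row:
--             bot_right[pos] = g[pos]
--
--     return [top_left, top_right, bot_left, bot_right]
--
-- def part1(data: Grid):
--     """Solve and return the answer to part 1."""
--     x = simulate(data, n=100)
--
--     quadrants = split_into_quadrants(x)
--     robots_per_quadrant = [sum([len(robots) for pos, robots in q.items()]) for q in quadrants]
--
--     safety_factor = 1
--     for n in robots_per_quadrant:
--         safety_factor *= n
--
--     return safety_factor
-- ===== SOURCE B (Python) =====
-- HEIGHT = 103
-- WIDTH = 101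
--
-- def part1(data):
--     """Solve and return the answer to part 1."""
--     middle_column = WIDTH // 2
--     middle_row = HEIGHT // 2
--     tl = tr = bl = br = 0
--     for (px, py), robots in data.items():
--         for vx, vy in robots:
--             x = (px + vx * 100) % WIDTH
--             y = (py + vy * 100) % HEIGHT
--             if x == middle_column or y == middle_row:
--                 continue
--             if x < middle_column:
--                 if y < middle_row:
--                     tl += 1
--                 else:
--                     bl += 1
--             else:
--                 if y < middle_row:
--                     tr += 1
--                 else:
--                     br += 1
--     return tl * tr * bl * br
-- ===== Notes on version B (the rewrite author's own statement) =====
-- stated objective: simpler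
-- what changed: one pass with four integer quadrant counters replaces building the moved-robot grid dict, splitting it into four quadrant dicts and summing their value lengths over three passes
import Mathlib
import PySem

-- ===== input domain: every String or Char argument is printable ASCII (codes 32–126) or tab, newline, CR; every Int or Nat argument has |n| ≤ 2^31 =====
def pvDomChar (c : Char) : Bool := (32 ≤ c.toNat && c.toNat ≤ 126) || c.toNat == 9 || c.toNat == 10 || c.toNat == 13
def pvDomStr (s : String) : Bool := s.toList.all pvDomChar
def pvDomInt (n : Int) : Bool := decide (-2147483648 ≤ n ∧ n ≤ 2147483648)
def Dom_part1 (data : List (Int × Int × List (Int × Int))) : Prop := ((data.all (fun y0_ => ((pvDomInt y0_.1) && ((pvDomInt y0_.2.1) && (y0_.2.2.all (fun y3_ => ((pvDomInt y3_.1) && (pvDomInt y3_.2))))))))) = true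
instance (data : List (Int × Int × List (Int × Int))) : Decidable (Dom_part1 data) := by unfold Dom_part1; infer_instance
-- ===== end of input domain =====

-- B replaces A's three passes (move every robot into a grid dict, split that dict into four
-- quadrant dicts, then sum their value lengths) by a single pass over the robots that
-- maintains four integer quadrant counters; objective: simpler.

def pvWIDTH : Int := 101
def pvHEIGHT : Int := 103

-- Both Pythons take a dict; under the type convention the argument is an association list,
-- and the dict the callee receives is dict(data): last value wins, first position kept.
def pvToDict (data : List (Int × Int × List (Int × Int))) :
    PySem.Dict (Int × Int) (List (Int × Int)) :=
  data.foldl (fun d t => d.insert (t.1, t.2.1) t.2.2) PySem.Dict.empty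

-- ===== PORT A =====
def simulate (g : PySem.Dict (Int × Int) (List (Int × Int))) (n : Int) (backwards : Bool) :
    PySem.Dict (Int × Int) (List (Int × Int)) :=
  g.items.foldl (fun nd kv =>
    kv.2.foldl (fun nd r =>
      let nx := if backwards then PySem.Int.mod (kv.1.1 - r.1 * n) pvWIDTH
                else PySem.Int.mod (kv.1.1 + r.1 * n) pvWIDTH
      let ny := if backwards then PySem.Int.mod (kv.1.2 - r.2 * n) pvHEIGHT
                else PySem.Int.mod (kv.1.2 + r.2 * n) pvHEIGHT
      nd.modify (nx, ny) [] (· ++ [r])) nd) PySem.Dict.empty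

def splitIntoQuadrants (g : PySem.Dict (Int × Int) (List (Int × Int))) :
    List (PySem.Dict (Int × Int) (List (Int × Int))) :=
  let mc := PySem.Int.floordiv pvWIDTH 2
  let mr := PySem.Int.floordiv pvHEIGHT 2
  let t := g.items.foldl (fun (q : PySem.Dict (Int × Int) (List (Int × Int)) ×
      PySem.Dict (Int × Int) (List (Int × Int)) × PySem.Dict (Int × Int) (List (Int × Int)) ×
      PySem.Dict (Int × Int) (List (Int × Int))) kv =>
    if kv.1.1 < mc ∧ kv.1.2 < mr then (q.1.insert kv.1 kv.2, q.2.1, q.2.2.1, q.2.2.2)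
    else if kv.1.1 > mc ∧ kv.1.2 < mr then (q.1, q.2.1.insert kv.1 kv.2, q.2.2.1, q.2.2.2)
    else if kv.1.1 < mc ∧ kv.1.2 > mr then (q.1, q.2.1, q.2.2.1.insert kv.1 kv.2, q.2.2.2)
    else if kv.1.1 > mc ∧ kv.1.2 > mr then (q.1, q.2.1, q.2.2.1, q.2.2.2.insert kv.1 kv.2)
    else q) (PySem.Dict.empty, PySem.Dict.empty, PySem.Dict.empty, PySem.Dict.empty)
  [t.1, t.2.1, t.2.2.1, t.2.2.2]

def part1 (data : List (Int × Int × List (Int × Int))) : Int :=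
  let x := simulate (pvToDict data) 100 false
  let quadrants := splitIntoQuadrants x
  let robotsPerQuadrant := quadrants.map (fun q => (q.items.map (fun kv => (kv.2.length : Int))).sum)
  robotsPerQuadrant.foldl (fun s n => s * n) 1

-- ===== PORT B =====
def part1_alt (data : List (Int × Int × List (Int × Int))) : Int :=
  let mc := PySem.Int.floordiv pvWIDTH 2
  let mr := PySem.Int.floordiv pvHEIGHT 2
  let c := (pvToDict data).items.foldl (fun c kv =>
    kv.2.foldl (fun (c : Int × Int × Int × Int) r =>
      let x := PySem.Int.mod (kv.1.1 + r.1 * 100) pvWIDTH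
      let y := PySem.Int.mod (kv.1.2 + r.2 * 100) pvHEIGHT
      if x = mc ∨ y = mr then c
      else if x < mc then
        (if y < mr then (c.1 + 1, c.2.1, c.2.2.1, c.2.2.2) else (c.1, c.2.1, c.2.2.1 + 1, c.2.2.2))
      else
        (if y < mr then (c.1, c.2.1 + 1, c.2.2.1, c.2.2.2) else (c.1, c.2.1, c.2.2.1, c.2.2.2 + 1))) c)
    ((0, 0, 0, 0) : Int × Int × Int × Int)
  c.1 * c.2.1 * c.2.2.1 * c.2.2.2

-- ===== PRECONDITION & SPEC =====
def Spec_part1 (data : List (Int × Int × List (Int × Int))) (out : Int) : Prop := out = part1_alt data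
instance (data : List (Int × Int × List (Int × Int))) (out : Int) : Decidable (Spec_part1 data out) := by unfold Spec_part1; infer_instance

-- ===== CLAIM (what is proved, stated in full; the proofs are below) =====
def Claim_equal_part1 : Prop := ∀ (data : List (Int × Int × List (Int × Int))), Dom_part1 data → Spec_part1 data (part1 data)

-- ===== LEMMAS AND PROOFS =====

lemma pvMC_eq : PySem.Int.floordiv pvWIDTH 2 = 50 := by decide
lemma pvMR_eq : PySem.Int.floordiv pvHEIGHT 2 = 51 := by decide

def pvMove (px py vx vy : Int) : Int × Int :=
  (PySem.Int.mod (px + vx * 100) pvWIDTH, PySem.Int.mod (py + vy * 100) pvHEIGHT)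

def pvMoves (g : PySem.Dict (Int × Int) (List (Int × Int))) : List ((Int × Int) × (Int × Int)) :=
  g.items.flatMap (fun kv => kv.2.map (fun r => (pvMove kv.1.1 kv.1.2 r.1 r.2, r)))

def pTL (c : Int × Int) : Bool := decide (c.1 < 50 ∧ c.2 < 51)
def pTR (c : Int × Int) : Bool := decide (c.1 > 50 ∧ c.2 < 51)
def pBL (c : Int × Int) : Bool := decide (c.1 < 50 ∧ c.2 > 51)
def pBR (c : Int × Int) : Bool := decide (c.1 > 50 ∧ c.2 > 51)

def pvSL (d : PySem.Dict (Int × Int) (List (Int × Int))) : Int :=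
  (d.items.map (fun kv => (kv.2.length : Int))).sum

def pvStep (c : Int × Int × Int × Int) (x : Int × Int) : Int × Int × Int × Int :=
  if x.1 = 50 ∨ x.2 = 51 then c
  else if x.1 < 50 then
    (if x.2 < 51 then (c.1 + 1, c.2.1, c.2.2.1, c.2.2.2) else (c.1, c.2.1, c.2.2.1 + 1, c.2.2.2))
  else
    (if x.2 < 51 then (c.1, c.2.1 + 1, c.2.2.1, c.2.2.2) else (c.1, c.2.1, c.2.2.1, c.2.2.2 + 1))

-- the simulate fold, flattened to one fold over the moved robots
lemma sim_flat (l : List ((Int × Int) × List (Int × Int)))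
    (d : PySem.Dict (Int × Int) (List (Int × Int))) :
    l.foldl (fun nd kv =>
      kv.2.foldl (fun nd r =>
        nd.modify (pvMove kv.1.1 kv.1.2 r.1 r.2) [] (· ++ [r])) nd) d
    = (l.flatMap (fun kv => kv.2.map (fun r => (pvMove kv.1.1 kv.1.2 r.1 r.2, r)))).foldl
        (fun d p => d.modify p.1 [] (· ++ [p.2])) d := by
  induction l generalizing d with
  | nil => rfl
  | cons kv t ih =>
    simp only [List.foldl_cons, List.flatMap_cons, List.foldl_append, List.foldl_map, ih]

lemma sim_eq (g : PySem.Dict (Int × Int) (List (Int × Int))) :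
    simulate g 100 false
    = (pvMoves g).foldl (fun d p => d.modify p.1 [] (· ++ [p.2])) PySem.Dict.empty := by
  exact sim_flat g.items PySem.Dict.empty

lemma keys_sim (g : PySem.Dict (Int × Int) (List (Int × Int))) :
    (simulate g 100 false).keys = PySem.Set.ofList ((pvMoves g).map (·.1)) := by
  rw [sim_eq]
  simp [PySem.Dict.keys_foldl_modify_key, PySem.Dict.keys_empty, PySem.Set.update_nil_left]

lemma nodup_keys_sim (g : PySem.Dict (Int × Int) (List (Int × Int))) :
    (simulate g 100 false).keys.Nodup := by
  rw [keys_sim]; exact PySem.Set.nodup_ofList _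

lemma getD_sim (g : PySem.Dict (Int × Int) (List (Int × Int))) (c : Int × Int) :
    (simulate g 100 false).getD c []
    = ((pvMoves g).filter (fun p => p.1 == c)).map (·.2) := by
  rw [sim_eq]
  simp [PySem.Dict.getD_foldl_modify_append, PySem.Dict.getD_empty]


lemma sum_ite_count (k : Int × Int) (cs : List (Int × Int)) (h : cs.Nodup) :
    (cs.map (fun c => if c = k then (1 : Int) else 0)).sum = if k ∈ cs then 1 else 0 := by
  induction cs with
  | nil => simp
  | cons c t ih =>
    rcases List.nodup_cons.mp h with ⟨hc, ht⟩
    by_cases hk : c = k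
    · subst hk
      simp [List.mem_cons, hc, ih ht]
    · simp [hk, ih ht, List.mem_cons, Ne.symm hk]

-- Σ_{c ∈ cs, p c} count c ks = #{k ∈ ks | p k ∧ k ∈ cs}   (cs without duplicates)
lemma count_sum (p : Int × Int → Bool) (cs ks : List (Int × Int)) (hnd : cs.Nodup) :
    ((cs.filter p).map (fun c => (ks.count c : Int))).sum
    = (ks.countP (fun k => p k && decide (k ∈ cs)) : Int) := by
  induction ks with
  | nil => simp
  | cons k t ih =>
    simp only [List.count_cons, List.countP_cons]
    push_cast
    rw [PySem.List.sum_map_add_int]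
    rw [ih]
    have h1 : ((cs.filter p).map (fun c => if (k == c) then (1 : Int) else 0)).sum
        = if p k && decide (k ∈ cs) then 1 else 0 := by
      have h2 := sum_ite_count k (cs.filter p) (hnd.filter p)
      rw [show (fun c => if (k == c) then (1:Int) else 0)
            = (fun c => if c = k then (1:Int) else 0) by
        funext c
        by_cases h : c = k
        · simp [h]
        · have h' : ¬ k = c := fun hh => h hh.symm
          simp [h, h']]
      rw [h2]
      by_cases hp : p k = true <;> by_cases hm : k ∈ cs <;>
        simp [List.mem_filter, hp, hm]
    rw [h1]

-- quadrant sum of the simulated grid = count of moved robots in that region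
lemma quad_count (g : PySem.Dict (Int × Int) (List (Int × Int))) (p : Int × Int → Bool) :
    (((simulate g 100 false).items.filter (fun kv => p kv.1)).map
      (fun kv => (kv.2.length : Int))).sum
    = (((pvMoves g).map (·.1)).countP p : Int) := by
  have hnd := nodup_keys_sim g
  have hitems := PySem.Dict.items_eq_map_keys (simulate g 100 false) hnd ([] : List (Int × Int))
  rw [hitems, List.filter_map, List.map_map]
  have hfun : ((fun kv => ((kv.2.length : Nat) : Int)) ∘ fun k => (k, (simulate g 100 false).getD k []))
      = fun k => ((((pvMoves g).map (·.1)).count k : Nat) : Int) := by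
    funext k
    simp only [Function.comp_apply]
    rw [getD_sim g k]
    simp [List.count, List.countP_map, ← List.countP_eq_length_filter, Function.comp_def]
  rw [hfun]
  have hkeys : (simulate g 100 false).keys = PySem.List.dedup ((pvMoves g).map (·.1)) := by
    rw [keys_sim]; simp [PySem.List.dedup_eq_ofList]
  rw [show ((fun kv => p kv.1) ∘ fun k => (k, (simulate g 100 false).getD k [])) = p by
    funext k; simp]
  rw [hkeys, count_sum p _ _ (PySem.List.nodup_dedup _)]
  congr 1
  apply List.countP_congr
  intro a ha
  simp [ha]

-- the split fold: each input pair lands in the dict of its region, so each quadrant's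
-- value-length sum grows by the filtered length sum
lemma split_fold (l : List ((Int × Int) × List (Int × Int))) (hnd : (l.map (·.1)).Nodup)
    (q1 q2 q3 q4 : PySem.Dict (Int × Int) (List (Int × Int)))
    (h1 : ∀ p ∈ l, q1.contains p.1 = false) (h2 : ∀ p ∈ l, q2.contains p.1 = false)
    (h3 : ∀ p ∈ l, q3.contains p.1 = false) (h4 : ∀ p ∈ l, q4.contains p.1 = false) :
    (fun t => pvSL t.1 = pvSL q1
          + ((l.filter (fun kv => pTL kv.1)).map (fun kv => (kv.2.length : Int))).sum
        ∧ pvSL t.2.1 = pvSL q2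
          + ((l.filter (fun kv => pTR kv.1)).map (fun kv => (kv.2.length : Int))).sum
        ∧ pvSL t.2.2.1 = pvSL q3
          + ((l.filter (fun kv => pBL kv.1)).map (fun kv => (kv.2.length : Int))).sum
        ∧ pvSL t.2.2.2 = pvSL q4
          + ((l.filter (fun kv => pBR kv.1)).map (fun kv => (kv.2.length : Int))).sum)
    (l.foldl (fun (q : PySem.Dict (Int × Int) (List (Int × Int)) ×
      PySem.Dict (Int × Int) (List (Int × Int)) × PySem.Dict (Int × Int) (List (Int × Int)) ×
      PySem.Dict (Int × Int) (List (Int × Int))) kv =>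
      if kv.1.1 < 50 ∧ kv.1.2 < 51 then (q.1.insert kv.1 kv.2, q.2.1, q.2.2.1, q.2.2.2)
      else if kv.1.1 > 50 ∧ kv.1.2 < 51 then (q.1, q.2.1.insert kv.1 kv.2, q.2.2.1, q.2.2.2)
      else if kv.1.1 < 50 ∧ kv.1.2 > 51 then (q.1, q.2.1, q.2.2.1.insert kv.1 kv.2, q.2.2.2)
      else if kv.1.1 > 50 ∧ kv.1.2 > 51 then (q.1, q.2.1, q.2.2.1, q.2.2.2.insert kv.1 kv.2)
      else q) (q1, q2, q3, q4)) := by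
  induction l generalizing q1 q2 q3 q4 with
  | nil => simp
  | cons kv t ih =>
    simp only [List.map_cons, List.nodup_cons] at hnd
    obtain ⟨hk, hndt⟩ := hnd
    have hne : ∀ p ∈ t, p.1 ≠ kv.1 := by
      intro p hp heq
      exact hk (heq ▸ List.mem_map_of_mem hp)
    have hSL : ∀ (q : PySem.Dict (Int × Int) (List (Int × Int))), q.contains kv.1 = false →
        pvSL (q.insert kv.1 kv.2) = pvSL q + (kv.2.length : Int) := by
      intro q hq
      unfold pvSL
      rw [PySem.Dict.items_insert_of_not_contains]
      · simp
      · exact hq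
    have hcont : ∀ (q : PySem.Dict (Int × Int) (List (Int × Int))),
        (∀ p ∈ kv :: t, q.contains p.1 = false) →
        ∀ p ∈ t, (q.insert kv.1 kv.2).contains p.1 = false := by
      intro q hq p hp
      rw [PySem.Dict.contains_insert]
      simp [hne p hp, hq p (List.mem_cons_of_mem _ hp)]
    have htail : ∀ (q : PySem.Dict (Int × Int) (List (Int × Int))),
        (∀ p ∈ kv :: t, q.contains p.1 = false) → ∀ p ∈ t, q.contains p.1 = false :=
      fun q hq p hp => hq p (List.mem_cons_of_mem _ hp)
    simp only [List.foldl_cons]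
    by_cases cA : kv.1.1 < 50 ∧ kv.1.2 < 51
    · rw [if_pos cA]
      have := ih hndt (q1.insert kv.1 kv.2) q2 q3 q4
        (hcont q1 h1) (htail q2 h2) (htail q3 h3) (htail q4 h4)
      have eTL : pTL kv.1 = true := by simp [pTL]; omega
      have eTR : pTR kv.1 = false := by simp [pTR]; omega
      have eBL : pBL kv.1 = false := by simp [pBL]; omega
      have eBR : pBR kv.1 = false := by simp [pBR]; omega
      refine ⟨?_, ?_, ?_, ?_⟩ <;>
        [ rw [this.1, hSL q1 (h1 kv List.mem_cons_self)]; rw [this.2.1]; rw [this.2.2.1];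
          rw [this.2.2.2] ] <;>
        simp [eTL, eTR, eBL, eBR] <;> omega
    · rw [if_neg cA]
      by_cases cB : kv.1.1 > 50 ∧ kv.1.2 < 51
      · rw [if_pos cB]
        have := ih hndt q1 (q2.insert kv.1 kv.2) q3 q4
          (htail q1 h1) (hcont q2 h2) (htail q3 h3) (htail q4 h4)
        have eTL : pTL kv.1 = false := by simp [pTL]; omega
        have eTR : pTR kv.1 = true := by simp [pTR]; omega
        have eBL : pBL kv.1 = false := by simp [pBL]; omega
        have eBR : pBR kv.1 = false := by simp [pBR]; omega
        refine ⟨?_, ?_, ?_, ?_⟩ <;>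
          [ rw [this.1]; rw [this.2.1, hSL q2 (h2 kv List.mem_cons_self)]; rw [this.2.2.1];
            rw [this.2.2.2] ] <;>
          simp [eTL, eTR, eBL, eBR] <;> omega
      · rw [if_neg cB]
        by_cases cC : kv.1.1 < 50 ∧ kv.1.2 > 51
        · rw [if_pos cC]
          have := ih hndt q1 q2 (q3.insert kv.1 kv.2) q4
            (htail q1 h1) (htail q2 h2) (hcont q3 h3) (htail q4 h4)
          have eTL : pTL kv.1 = false := by simp [pTL]; omega
          have eTR : pTR kv.1 = false := by simp [pTR]; omega
          have eBL : pBL kv.1 = true := by simp [pBL]; omega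
          have eBR : pBR kv.1 = false := by simp [pBR]; omega
          refine ⟨?_, ?_, ?_, ?_⟩ <;>
            [ rw [this.1]; rw [this.2.1]; rw [this.2.2.1, hSL q3 (h3 kv List.mem_cons_self)];
              rw [this.2.2.2] ] <;>
            simp [eTL, eTR, eBL, eBR] <;> omega
        · rw [if_neg cC]
          by_cases cD : kv.1.1 > 50 ∧ kv.1.2 > 51
          · rw [if_pos cD]
            have := ih hndt q1 q2 q3 (q4.insert kv.1 kv.2)
              (htail q1 h1) (htail q2 h2) (htail q3 h3) (hcont q4 h4)
            have eTL : pTL kv.1 = false := by simp [pTL]; omega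
            have eTR : pTR kv.1 = false := by simp [pTR]; omega
            have eBL : pBL kv.1 = false := by simp [pBL]; omega
            have eBR : pBR kv.1 = true := by simp [pBR]; omega
            refine ⟨?_, ?_, ?_, ?_⟩ <;>
              [ rw [this.1]; rw [this.2.1]; rw [this.2.2.1];
                rw [this.2.2.2, hSL q4 (h4 kv List.mem_cons_self)] ] <;>
              simp [eTL, eTR, eBL, eBR] <;> omega
          · rw [if_neg cD]
            have := ih hndt q1 q2 q3 q4
              (htail q1 h1) (htail q2 h2) (htail q3 h3) (htail q4 h4)
            have eTL : pTL kv.1 = false := by simp [pTL]; omega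
            have eTR : pTR kv.1 = false := by simp [pTR]; omega
            have eBL : pBL kv.1 = false := by simp [pBL]; omega
            have eBR : pBR kv.1 = false := by simp [pBR]; omega
            refine ⟨?_, ?_, ?_, ?_⟩ <;>
              [ rw [this.1]; rw [this.2.1]; rw [this.2.2.1]; rw [this.2.2.2] ] <;>
              simp [eTL, eTR, eBL, eBR]

-- B's nested loop, flattened to one fold over the moved positions
lemma alt_flat (l : List ((Int × Int) × List (Int × Int))) (c0 : Int × Int × Int × Int) :
    l.foldl (fun c kv =>
      kv.2.foldl (fun c r => pvStep c (pvMove kv.1.1 kv.1.2 r.1 r.2)) c) c0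
    = (l.flatMap (fun kv => kv.2.map (fun r => pvMove kv.1.1 kv.1.2 r.1 r.2))).foldl pvStep c0 := by
  induction l generalizing c0 with
  | nil => rfl
  | cons kv t ih =>
    simp only [List.foldl_cons, List.flatMap_cons, List.foldl_append, List.foldl_map, ih]

-- the counter fold counts the four regions
lemma alt_count (ms : List (Int × Int)) (c : Int × Int × Int × Int) :
    ms.foldl pvStep c = (c.1 + (ms.countP pTL : Int), c.2.1 + (ms.countP pTR : Int),
      c.2.2.1 + (ms.countP pBL : Int), c.2.2.2 + (ms.countP pBR : Int)) := by
  induction ms generalizing c with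
  | nil => simp
  | cons a t ih =>
    simp only [List.foldl_cons, List.countP_cons, ih]
    by_cases h0 : a.1 = 50 ∨ a.2 = 51
    · have : pvStep c a = c := by simp [pvStep, h0]
      rw [this]
      rcases h0 with h0 | h0 <;>
        simp [pTL, pTR, pBL, pBR, h0]
    · rw [not_or] at h0
      obtain ⟨h50, h51⟩ := h0
      simp only [List.countP_cons, pvStep, pTL, pTR, pBL, pBR,
        Bool.and_eq_true, decide_eq_true_eq]
      split_ifs with hA hB hC hD hE hF hG hH hI hJ hK hL hM hN hO <;>
        first
          | omega
          | (simp only [Prod.ext_iff]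
             push_cast
             refine ⟨by omega, by omega, by omega, by omega⟩)

-- A's result, closed over the moved positions
lemma partA_eq (data : List (Int × Int × List (Int × Int))) :
    part1 data
    = (1 * ((((pvMoves (pvToDict data)).map (·.1)).countP pTL : Int))
        * ((((pvMoves (pvToDict data)).map (·.1)).countP pTR : Int))
        * ((((pvMoves (pvToDict data)).map (·.1)).countP pBL : Int))
        * ((((pvMoves (pvToDict data)).map (·.1)).countP pBR : Int))) := by
  have hnd : ((simulate (pvToDict data) 100 false).items.map (·.1)).Nodup :=
    nodup_keys_sim (pvToDict data)
  have hce : ∀ p ∈ (simulate (pvToDict data) 100 false).items,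
      (PySem.Dict.empty : PySem.Dict (Int × Int) (List (Int × Int))).contains p.1 = false := by
    intro p _; simp [PySem.Dict.contains_empty]
  have hs := split_fold (simulate (pvToDict data) 100 false).items hnd
    PySem.Dict.empty PySem.Dict.empty PySem.Dict.empty PySem.Dict.empty hce hce hce hce
  simp only at hs
  unfold part1 splitIntoQuadrants
  simp only [pvMC_eq, pvMR_eq, List.map_cons, List.map_nil, List.foldl_cons, List.foldl_nil]
  have hSLe : pvSL (PySem.Dict.empty : PySem.Dict (Int × Int) (List (Int × Int))) = 0 := by
    simp [pvSL]
    rfl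
  simp only [show ∀ q : PySem.Dict (Int × Int) (List (Int × Int)),
      (q.items.map (fun kv => (kv.2.length : Int))).sum = pvSL q from fun _ => rfl]
  rw [hs.1, hs.2.1, hs.2.2.1, hs.2.2.2, hSLe, quad_count, quad_count, quad_count, quad_count]
  ring

-- B's result, closed over the moved positions
lemma partB_eq (data : List (Int × Int × List (Int × Int))) :
    part1_alt data
    = ((((pvMoves (pvToDict data)).map (·.1)).countP pTL : Int))
        * ((((pvMoves (pvToDict data)).map (·.1)).countP pTR : Int))
        * ((((pvMoves (pvToDict data)).map (·.1)).countP pBL : Int))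
        * ((((pvMoves (pvToDict data)).map (·.1)).countP pBR : Int)) := by
  have e : part1_alt data
      = (((pvToDict data).items.foldl (fun c kv =>
          kv.2.foldl (fun c r => pvStep c (pvMove kv.1.1 kv.1.2 r.1 r.2)) c)
          ((0, 0, 0, 0) : Int × Int × Int × Int)).1)
        * (((pvToDict data).items.foldl (fun c kv =>
          kv.2.foldl (fun c r => pvStep c (pvMove kv.1.1 kv.1.2 r.1 r.2)) c)
          ((0, 0, 0, 0) : Int × Int × Int × Int)).2.1)
        * (((pvToDict data).items.foldl (fun c kv =>
          kv.2.foldl (fun c r => pvStep c (pvMove kv.1.1 kv.1.2 r.1 r.2)) c)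
          ((0, 0, 0, 0) : Int × Int × Int × Int)).2.2.1)
        * (((pvToDict data).items.foldl (fun c kv =>
          kv.2.foldl (fun c r => pvStep c (pvMove kv.1.1 kv.1.2 r.1 r.2)) c)
          ((0, 0, 0, 0) : Int × Int × Int × Int)).2.2.2) := rfl
  rw [e, alt_flat, alt_count]
  have hm : (pvMoves (pvToDict data)).map (·.1)
      = (pvToDict data).items.flatMap (fun kv => kv.2.map (fun r => pvMove kv.1.1 kv.1.2 r.1 r.2)) := by
    simp [pvMoves, List.map_flatMap, List.map_map, Function.comp_def]
  rw [← hm]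
  simp

-- ===== VERDICT (by name: the statement is the Claim_ definition above) =====
theorem part1_spec : Claim_equal_part1 := by
  intro data _
  unfold Spec_part1
  rw [partA_eq, partB_eq]
  ring
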